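-- pv_equiv track=rewrite | github.com/aaron-goshine/generic-programing | egyptian-mutiplication.py | mult_acc3
-- ===== SOURCE A (Python) =====
-- def odd(n):
--     return n & 0x1
--
-- def half(n):
--     return n >> 1
--
-- def mult_acc3(r, n, a):
--     if odd(n):
--         r = r + a
--         if n == 1:
--             return r
--     n = half(n)
--     a = a + a
--     return mult_acc3(r, n, a)
-- ===== SOURCE B (Python) =====
-- def mult_acc3(r, n, a):
--     # Direct arithmetic: Egyptian multiplication computes r + n*a.
--     return r + n * a
-- ===== Notes on version B (the rewrite author's own statement) =====
-- stated objective: faster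
-- what changed: Replaces the recursive halving/doubling (Egyptian multiplication) loop by the closed form r + n*a.
-- crash fix: For n <= 0 A recurses forever (RecursionError in CPython); B returns r + n*a there. — e.g. on mult_acc3(3, 0, 5): A raises RecursionError, B returns 3
import Mathlib
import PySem

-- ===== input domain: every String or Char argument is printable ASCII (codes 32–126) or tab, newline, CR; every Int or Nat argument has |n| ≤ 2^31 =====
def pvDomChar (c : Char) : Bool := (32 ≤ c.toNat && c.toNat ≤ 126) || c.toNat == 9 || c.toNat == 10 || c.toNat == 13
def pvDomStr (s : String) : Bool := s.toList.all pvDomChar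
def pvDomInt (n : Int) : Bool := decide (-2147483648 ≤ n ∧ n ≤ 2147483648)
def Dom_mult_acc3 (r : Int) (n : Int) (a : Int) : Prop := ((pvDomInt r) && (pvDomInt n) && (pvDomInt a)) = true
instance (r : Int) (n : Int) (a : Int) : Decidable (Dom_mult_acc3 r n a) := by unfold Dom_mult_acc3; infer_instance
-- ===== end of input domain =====

-- B replaces the halving/doubling recursion by the closed form r + n*a (return-value equivalence; A recurses forever for n ≤ 0, excluded by Pre_).

-- ===== PORT A =====
-- odd(n) = n & 0x1
def pyOdd (n : Int) : Int := PySem.Int.band n 1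
-- half(n) = n >> 1
def pyHalf (n : Int) : Int := n >>> (1 : Nat)

-- the Python recursion diverges for n ≤ 0; the guard `if n ≤ 0 then r` only makes the
-- Lean function total there (those inputs are outside Pre_mult_acc3).
def mult_acc3 (r : Int) (n : Int) (a : Int) : Int :=
  if hn : n ≤ 0 then r
  else
    if pyOdd n = 1 then
      if n = 1 then r + a
      else mult_acc3 (r + a) (pyHalf n) (a + a)
    else mult_acc3 r (pyHalf n) (a + a)
termination_by n.toNat
decreasing_by
  · simp only [pyHalf, Int.shiftRight_eq_div_pow]; omega
  · simp only [pyHalf, Int.shiftRight_eq_div_pow]; omega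

-- ===== PORT B =====
def mult_acc3_alt (r : Int) (n : Int) (a : Int) : Int := r + n * a

-- ===== PRECONDITION & SPEC =====
-- Pre_ excludes n ≤ 0, on which the Python A never returns (RecursionError).
def Pre_mult_acc3 (r : Int) (n : Int) (a : Int) : Prop := 1 ≤ n
instance (r : Int) (n : Int) (a : Int) : Decidable (Pre_mult_acc3 r n a) := by unfold Pre_mult_acc3; infer_instance
def pvWitness_mult_acc3 : Int × Int × Int := (2, 7, 5)

-- For n ≤ 0 A recurses forever (RecursionError in CPython); B returns r + n*a there.
def Raises_mult_acc3 (r : Int) (n : Int) (a : Int) : Prop := n ≤ 0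
instance (r : Int) (n : Int) (a : Int) : Decidable (Raises_mult_acc3 r n a) := by unfold Raises_mult_acc3; infer_instance
def pvRaiseWitness_mult_acc3 : Int × Int × Int := (3, 0, 5)
def pvRaiseWitnessOut_mult_acc3 : Int := 3

def Spec_mult_acc3 (r : Int) (n : Int) (a : Int) (out : Int) : Prop := out = mult_acc3_alt r n a
instance (r : Int) (n : Int) (a : Int) (out : Int) : Decidable (Spec_mult_acc3 r n a out) := by unfold Spec_mult_acc3; infer_instance

-- ===== CLAIM (what is proved, stated in full; the proofs are below) =====
def Claim_equal_mult_acc3 : Prop := ∀ (r : Int) (n : Int) (a : Int), Dom_mult_acc3 r n a → Pre_mult_acc3 r n a → Spec_mult_acc3 r n a (mult_acc3 r n a)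
def Claim_raises_mult_acc3 : Prop := (∀ (r : Int) (n : Int) (a : Int), Dom_mult_acc3 r n a → Raises_mult_acc3 r n a → ¬ Pre_mult_acc3 r n a) ∧ (Dom_mult_acc3 (pvRaiseWitness_mult_acc3.1) (pvRaiseWitness_mult_acc3.2.1) (pvRaiseWitness_mult_acc3.2.2) ∧ Raises_mult_acc3 (pvRaiseWitness_mult_acc3.1) (pvRaiseWitness_mult_acc3.2.1) (pvRaiseWitness_mult_acc3.2.2) ∧ mult_acc3_alt (pvRaiseWitness_mult_acc3.1) (pvRaiseWitness_mult_acc3.2.1) (pvRaiseWitness_mult_acc3.2.2) = pvRaiseWitnessOut_mult_acc3)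

-- ===== LEMMAS AND PROOFS =====
theorem pyOdd_eq (n : Int) (hn : 1 ≤ n) : pyOdd n = n % 2 := by
  simp only [pyOdd, PySem.Int.band_one, PySem.Int.mod_eq_emod_of_pos (show (0:Int) < 2 by omega)]

theorem pyHalf_eq (n : Int) : pyHalf n = n / 2 := by
  simp [pyHalf, Int.shiftRight_eq_div_pow]

theorem mult_acc3_eq_aux : ∀ k : Nat, ∀ r n a : Int, n.toNat = k → 1 ≤ n → mult_acc3 r n a = r + n * a := by
  intro k
  induction k using Nat.strong_induction_on with
  | _ k ih =>
    intro r n a hk hn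
    rw [mult_acc3, dif_neg (by omega : ¬ n ≤ 0)]
    by_cases hodd : pyOdd n = 1
    · rw [if_pos hodd]
      rw [pyOdd_eq n hn] at hodd
      by_cases h1 : n = 1
      · rw [if_pos h1]; subst h1; ring
      · rw [if_neg h1]
        have hlt : (pyHalf n).toNat < k := by rw [pyHalf_eq]; omega
        rw [ih _ hlt (r + a) (pyHalf n) (a + a) rfl (by rw [pyHalf_eq]; omega)]
        have h2 : 2 * (n / 2) = n - 1 := by omega
        rw [pyHalf_eq]
        calc r + a + (n / 2) * (a + a) = r + a + (2 * (n / 2)) * a := by ring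
          _ = r + a + (n - 1) * a := by rw [h2]
          _ = r + n * a := by ring
    · rw [if_neg hodd]
      have heven : n % 2 = 0 := by rw [pyOdd_eq n hn] at hodd; omega
      have hlt : (pyHalf n).toNat < k := by rw [pyHalf_eq]; omega
      rw [ih _ hlt r (pyHalf n) (a + a) rfl (by rw [pyHalf_eq]; omega)]
      have h2 : 2 * (n / 2) = n := by omega
      rw [pyHalf_eq]
      calc r + (n / 2) * (a + a) = r + (2 * (n / 2)) * a := by ring
        _ = r + n * a := by rw [h2]

theorem mult_acc3_eq (r n a : Int) (hn : 1 ≤ n) : mult_acc3 r n a = r + n * a :=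
  mult_acc3_eq_aux n.toNat r n a rfl hn

-- ===== VERDICT (by name: the statement is the Claim_ definition above) =====
theorem mult_acc3_spec : Claim_equal_mult_acc3 := by
  intro r n a _ hpre
  unfold Spec_mult_acc3 mult_acc3_alt
  exact mult_acc3_eq r n a hpre

theorem mult_acc3_raises : Claim_raises_mult_acc3 := by
  unfold Claim_raises_mult_acc3
  exact ⟨fun r n a _ h => by unfold Raises_mult_acc3 at h; unfold Pre_mult_acc3; omega, by decide⟩

-- self-check: the raise witness (3, 0, 5) lies in Raises_ and outside Pre_, as Claim_raises asserts
theorem pvRaiseWitness_ok : Raises_mult_acc3 3 0 5 ∧ ¬ Pre_mult_acc3 3 0 5 :=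
  ⟨by decide, mult_acc3_raises.1 3 0 5 (by decide) (by decide)⟩
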